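-- pv_equiv track=rewrite | github.com/LukeTatarsky/Algorithm-Design-Analysis-I | A2_D&C/a2q1.py | twoWayTwoSum
-- ===== SOURCE A (Python) =====
-- def binSearch(arr, x, low, high):
--
--     if high >= low:
--         mid = (low + high) // 2
--         if arr[mid] == x:
--             return True
--         elif arr[mid] < x:
--             return binSearch(arr, x, mid+1, high)
--         else:
--             return binSearch(arr, x, low, mid-1)
--     else:
--         return False
--
-- def aSum_calc(A):
--     aSums = []
--     for i in range(len(A)):
--         for j in range(i,len(A)):
--             #Asums.append([i,j,A[i]+A[j]])  if we wanted indices then it would be something like this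
--             aSums.append(A[i]+A[j])
--     return aSums
--
-- def bSum_calc(B):
--     bSums = []
--     for i in range(len(B)):
--         for j in range(i,len(B)):
--             bSums.append(B[i]+B[j])
--     return bSums
--
-- def twoWayTwoSum(A,B):
--     # create array of all possible sums. new array is n(n+1)/2 -> n^2
--     aSums = aSum_calc(A)
--     bSums = bSum_calc(B)
--
--     # merge sort run time is n^2logn^2  -> n^2logn
--     bSums = sorted(bSums)
--
--     # now do linear checking of one array and binary search of the other
--     for i in range(len(aSums)):
--         #found = binSearch(bSums, aSums[i], 0, len(bSums)-1)
--         if (binSearch(bSums, aSums[i], 0, len(bSums)-1)):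
--             return True
--
--     return False
-- ===== SOURCE B (Python) =====
-- def twoWayTwoSum(A, B):
--     seen = set()
--     n = len(A)
--     for i in range(n):
--         for j in range(i, n):
--             seen.add(A[i] + A[j])
--     m = len(B)
--     for i in range(m):
--         for j in range(i, m):
--             if B[i] + B[j] in seen:
--                 return True
--     return False
-- ===== Notes on version B (the rewrite author's own statement) =====
-- stated objective: faster
-- what changed: Replaced sort-plus-per-element-binary-search over both pair-sum lists by a hash set of A's pair sums built once and an early-exit membership scan over B's pairs (no sorting, no binary search, no materialised sum lists).
import Mathlib
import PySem

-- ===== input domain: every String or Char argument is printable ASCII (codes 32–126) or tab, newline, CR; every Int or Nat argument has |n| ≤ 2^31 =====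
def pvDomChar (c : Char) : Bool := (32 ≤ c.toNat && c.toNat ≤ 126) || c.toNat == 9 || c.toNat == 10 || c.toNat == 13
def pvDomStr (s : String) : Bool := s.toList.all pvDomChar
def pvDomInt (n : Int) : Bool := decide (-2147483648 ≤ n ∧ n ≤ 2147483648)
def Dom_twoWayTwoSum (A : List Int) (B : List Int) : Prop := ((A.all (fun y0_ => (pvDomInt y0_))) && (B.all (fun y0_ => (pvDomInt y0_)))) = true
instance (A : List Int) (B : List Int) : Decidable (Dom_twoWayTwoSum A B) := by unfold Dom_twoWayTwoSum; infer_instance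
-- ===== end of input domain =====

-- B replaces A's sort + per-element binary search over the two pair-sum lists by a set of
-- A's pair sums built once and an early-exit membership scan over B's pairs (objective: faster).


-- ===== PORT A =====
def binSearch (arr : List Int) (x : Int) (low : Int) (high : Int) : Bool :=
  if _h : high ≥ low then
    let mid := PySem.Int.floordiv (low + high) 2
    match PySem.List.pyGet? arr mid with
    | some v =>
      if v = x then true
      else if v < x then binSearch arr x (mid + 1) high
      else binSearch arr x low (mid - 1)
    | none => false   -- arr[mid] IndexError; unreachable in twoWayTwoSum's calls (0 ≤ low, high < len arr)
  else false
termination_by (high + 1 - low).toNat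
decreasing_by
  all_goals
    have hb := PySem.Int.floordiv_two_mid_bounds (lo := low) (hi := high) _h
    omega

def aSum_calc (A : List Int) : List Int :=
  (PySem.List.pyRange 0 (A.length : Int) 1).foldl (fun aSums i =>
    (PySem.List.pyRange i (A.length : Int) 1).foldl (fun aSums j =>
      aSums ++ [PySem.List.pyGetD A i 0 + PySem.List.pyGetD A j 0]) aSums) []

def bSum_calc (B : List Int) : List Int :=
  (PySem.List.pyRange 0 (B.length : Int) 1).foldl (fun bSums i =>
    (PySem.List.pyRange i (B.length : Int) 1).foldl (fun bSums j =>
      bSums ++ [PySem.List.pyGetD B i 0 + PySem.List.pyGetD B j 0]) bSums) []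

def twoWayTwoSum (A : List Int) (B : List Int) : Bool :=
  let aSums := aSum_calc A
  let bSums := PySem.List.sorted (bSum_calc B) (fun x => x) false
  (PySem.List.pyRange 0 (aSums.length : Int) 1).any (fun i =>
    binSearch bSums (PySem.List.pyGetD aSums i 0) 0 ((bSums.length : Int) - 1))

-- ===== PORT B =====
def twoWayTwoSum_alt (A : List Int) (B : List Int) : Bool :=
  let seen : PySem.Set Int :=
    (PySem.List.pyRange 0 (A.length : Int) 1).foldl (fun s i =>
      (PySem.List.pyRange i (A.length : Int) 1).foldl (fun s j =>
        PySem.Set.add s (PySem.List.pyGetD A i 0 + PySem.List.pyGetD A j 0)) s) PySem.Set.empty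
  (PySem.List.pyRange 0 (B.length : Int) 1).any (fun i =>
    (PySem.List.pyRange i (B.length : Int) 1).any (fun j =>
      PySem.Set.contains seen (PySem.List.pyGetD B i 0 + PySem.List.pyGetD B j 0)))

-- ===== PRECONDITION & SPEC =====
def Spec_twoWayTwoSum (A : List Int) (B : List Int) (out : Bool) : Prop := out = twoWayTwoSum_alt A B
instance (A : List Int) (B : List Int) (out : Bool) : Decidable (Spec_twoWayTwoSum A B out) := by unfold Spec_twoWayTwoSum; infer_instance

-- ===== CLAIM (what is proved, stated in full; the proofs are below) =====
def Claim_equal_twoWayTwoSum : Prop := ∀ (A : List Int) (B : List Int), Dom_twoWayTwoSum A B → Spec_twoWayTwoSum A B (twoWayTwoSum A B)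

-- ===== LEMMAS AND PROOFS =====

-- the pair-sum list, as a flatMap
lemma aSum_calc_eq (A : List Int) :
    aSum_calc A = (PySem.List.pyRange 0 (A.length : Int) 1).flatMap (fun i =>
      (PySem.List.pyRange i (A.length : Int) 1).map (fun j =>
        PySem.List.pyGetD A i 0 + PySem.List.pyGetD A j 0)) := by
  unfold aSum_calc
  rw [PySem.List.foldl_congr_mem (g := fun acc i => acc ++
      (PySem.List.pyRange i (A.length : Int) 1).map (fun j =>
        PySem.List.pyGetD A i 0 + PySem.List.pyGetD A j 0))]
  · rw [PySem.List.foldl_append_eq_flatMap]; simp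
  · intro acc i _
    rw [PySem.List.foldl_append_singleton_eq_map]

lemma bSum_calc_eq (B : List Int) :
    bSum_calc B = (PySem.List.pyRange 0 (B.length : Int) 1).flatMap (fun i =>
      (PySem.List.pyRange i (B.length : Int) 1).map (fun j =>
        PySem.List.pyGetD B i 0 + PySem.List.pyGetD B j 0)) := by
  unfold bSum_calc
  rw [PySem.List.foldl_congr_mem (g := fun acc i => acc ++
      (PySem.List.pyRange i (B.length : Int) 1).map (fun j =>
        PySem.List.pyGetD B i 0 + PySem.List.pyGetD B j 0))]
  · rw [PySem.List.foldl_append_eq_flatMap]; simp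
  · intro acc i _
    rw [PySem.List.foldl_append_singleton_eq_map]

-- membership in the pair-sum list
lemma mem_bSum_calc (B : List Int) (x : Int) :
    x ∈ bSum_calc B ↔ ∃ i j : Int, 0 ≤ i ∧ i ≤ j ∧ j < (B.length : Int) ∧
      x = PySem.List.pyGetD B i 0 + PySem.List.pyGetD B j 0 := by
  rw [bSum_calc_eq]
  simp only [List.mem_flatMap, List.mem_map, PySem.List.mem_pyRange_one]
  constructor
  · rintro ⟨i, ⟨hi0, hin⟩, j, ⟨hij, hjn⟩, rfl⟩
    exact ⟨i, j, hi0, hij, hjn, rfl⟩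
  · rintro ⟨i, j, hi0, hij, hjn, rfl⟩
    exact ⟨i, ⟨hi0, by omega⟩, j, ⟨hij, hjn⟩, rfl⟩

-- binary search on a sorted list finds exactly the elements in positions [low, high]
lemma pairwise_getElem_mono (arr : List Int) (hs : arr.Pairwise (· ≤ ·))
    (p q : Nat) (hpq : p ≤ q) (hq : q < arr.length) : arr[p] ≤ arr[q] := by
  rcases Nat.lt_or_ge p q with hlt | hge
  · exact List.pairwise_iff_getElem.1 hs p q (by omega) hq hlt
  · have : p = q := by omega
    subst this; exact le_refl _

lemma binSearch_correct (arr : List Int) (x : Int) (low high : Int) :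
    arr.Pairwise (· ≤ ·) → 0 ≤ low → high < (arr.length : Int) →
    (binSearch arr x low high = true ↔
      ∃ k : Nat, low ≤ (k : Int) ∧ (k : Int) ≤ high ∧ arr[k]? = some x) := by
  induction low, high using binSearch.induct arr x with
  | case1 low high h mid hget =>
    intro hs hl hh
    have hmid : mid = PySem.Int.floordiv (low + high) 2 := rfl
    have hb := PySem.Int.floordiv_two_mid_bounds (lo := low) (hi := high) h
    rw [← hmid] at hb
    have hm0 : 0 ≤ mid := by omega
    rw [binSearch]
    simp only [h, dite_true, ← hmid, hget, true_iff, reduceIte]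
    refine ⟨mid.toNat, by omega, by omega, ?_⟩
    rw [← PySem.List.pyGet?_of_nonneg arr hm0, hget]
  | case2 low high h mid v hget hvx hvlt ih =>
    intro hs hl hh
    have hmid : mid = PySem.Int.floordiv (low + high) 2 := rfl
    have hb := PySem.Int.floordiv_two_mid_bounds (lo := low) (hi := high) h
    rw [← hmid] at hb
    have hm0 : 0 ≤ mid := by omega
    have hgv : arr[mid.toNat]? = some v := by rw [← PySem.List.pyGet?_of_nonneg arr hm0, hget]
    have hmlen : mid.toNat < arr.length := (List.getElem?_eq_some_iff.1 hgv).1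
    have hveq : arr[mid.toNat] = v := (List.getElem?_eq_some_iff.1 hgv).2
    rw [binSearch]
    simp only [h, dite_true, ← hmid, hget, if_neg hvx, if_pos hvlt]
    rw [ih hs (by omega) hh]
    constructor
    · rintro ⟨k, h1, h2, h3⟩; exact ⟨k, by omega, h2, h3⟩
    · rintro ⟨k, h1, h2, h3⟩
      have hklen : k < arr.length := (List.getElem?_eq_some_iff.1 h3).1
      have hkeq : arr[k] = x := (List.getElem?_eq_some_iff.1 h3).2
      have hk : mid < (k : Int) := by
        by_contra hc
        push Not at hc
        have hle : arr[k] ≤ arr[mid.toNat] :=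
          pairwise_getElem_mono arr hs k mid.toNat (by omega) hmlen
        rw [hkeq, hveq] at hle
        omega
      exact ⟨k, by omega, h2, h3⟩
  | case3 low high h mid v hget hvx hvlt ih =>
    intro hs hl hh
    have hmid : mid = PySem.Int.floordiv (low + high) 2 := rfl
    have hb := PySem.Int.floordiv_two_mid_bounds (lo := low) (hi := high) h
    rw [← hmid] at hb
    have hm0 : 0 ≤ mid := by omega
    have hgv : arr[mid.toNat]? = some v := by rw [← PySem.List.pyGet?_of_nonneg arr hm0, hget]
    have hmlen : mid.toNat < arr.length := (List.getElem?_eq_some_iff.1 hgv).1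
    have hveq : arr[mid.toNat] = v := (List.getElem?_eq_some_iff.1 hgv).2
    rw [binSearch]
    simp only [h, dite_true, ← hmid, hget, if_neg hvx, if_neg hvlt]
    rw [ih hs hl (by omega)]
    constructor
    · rintro ⟨k, h1, h2, h3⟩; exact ⟨k, h1, by omega, h3⟩
    · rintro ⟨k, h1, h2, h3⟩
      have hklen : k < arr.length := (List.getElem?_eq_some_iff.1 h3).1
      have hkeq : arr[k] = x := (List.getElem?_eq_some_iff.1 h3).2
      have hk : (k : Int) < mid := by
        by_contra hc
        push Not at hc
        have hle : arr[mid.toNat] ≤ arr[k] :=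
          pairwise_getElem_mono arr hs mid.toNat k (by omega) hklen
        rw [hkeq, hveq] at hle
        omega
      exact ⟨k, h1, by omega, h3⟩
  | case4 low high h mid hget =>
    intro hs hl hh
    have hmid : mid = PySem.Int.floordiv (low + high) 2 := rfl
    have hb := PySem.Int.floordiv_two_mid_bounds (lo := low) (hi := high) h
    rw [← hmid] at hb
    have hm0 : 0 ≤ mid := by omega
    rw [PySem.List.pyGet?_of_nonneg arr hm0] at hget
    have : mid.toNat < arr.length := by omega
    simp [this] at hget
  | case5 low high h =>
    intro hs hl hh
    rw [binSearch]
    simp only [h, dite_false, Bool.false_eq_true, false_iff, not_exists]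
    intro k
    rintro ⟨h1, h2, _⟩
    omega

-- B's set equals the ofList of A's pair-sum list
lemma seen_eq (A : List Int) :
    ((PySem.List.pyRange 0 (A.length : Int) 1).foldl (fun s i =>
      (PySem.List.pyRange i (A.length : Int) 1).foldl (fun s j =>
        PySem.Set.add s (PySem.List.pyGetD A i 0 + PySem.List.pyGetD A j 0)) s) PySem.Set.empty)
    = PySem.Set.ofList (aSum_calc A) := by
  rw [aSum_calc_eq, PySem.Set.ofList_eq_foldl, List.flatMap_def, List.foldl_flatten, List.foldl_map]
  apply PySem.List.foldl_congr_mem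
  intro acc i _
  rw [List.foldl_map]

-- both programs decide "some pair sum of A equals some pair sum of B"
lemma twoWayTwoSum_iff (A B : List Int) :
    twoWayTwoSum A B = true ↔ ∃ x, x ∈ aSum_calc A ∧ x ∈ bSum_calc B := by
  unfold twoWayTwoSum
  simp only [List.any_eq_true, PySem.List.mem_pyRange_one]
  set aSums := aSum_calc A with ha
  set bS := PySem.List.sorted (bSum_calc B) (fun x => x) false with hbS
  have hsorted : bS.Pairwise (· ≤ ·) := by
    simpa using PySem.List.sorted_pairwise (xs := bSum_calc B) (key := fun x => x)
  have hbin := fun a => binSearch_correct bS a 0 ((bS.length : Int) - 1) hsorted (le_refl 0)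
    (by omega)
  constructor
  · rintro ⟨i, ⟨hi0, hilt⟩, hfound⟩
    obtain ⟨k, _, _, hk⟩ := (hbin _).1 hfound
    refine ⟨PySem.List.pyGetD aSums i 0, ?_, ?_⟩
    · rw [PySem.List.pyGetD_eq_getElem aSums 0 hi0 hilt]
      exact List.getElem_mem _
    · rw [← PySem.List.mem_sorted (key := fun x => x) (rev := false), ← hbS]
      exact List.mem_of_getElem? hk
  · rintro ⟨x, hxa, hxb⟩
    rw [← PySem.List.mem_sorted (key := fun x => x) (rev := false), ← hbS] at hxb
    obtain ⟨i, hilt, hieq⟩ := List.getElem_of_mem hxa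
    obtain ⟨k, hklt, hkeq⟩ := List.getElem_of_mem hxb
    refine ⟨(i : Int), ⟨by omega, by omega⟩, ?_⟩
    have hget : PySem.List.pyGetD aSums (i : Int) 0 = x := by
      rw [PySem.List.pyGetD_natCast, List.getD_eq_getElem _ _ hilt, hieq]
    rw [hget]
    exact (hbin x).2 ⟨k, by omega, by omega, by rw [List.getElem?_eq_some_iff]; exact ⟨hklt, hkeq⟩⟩

lemma twoWayTwoSum_alt_iff (A B : List Int) :
    twoWayTwoSum_alt A B = true ↔ ∃ x, x ∈ aSum_calc A ∧ x ∈ bSum_calc B := by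
  unfold twoWayTwoSum_alt
  rw [seen_eq]
  simp only [List.any_eq_true, PySem.List.mem_pyRange_one, PySem.Set.contains_iff,
    PySem.Set.mem_ofList]
  constructor
  · rintro ⟨i, ⟨hi0, _⟩, j, ⟨hij, hjm⟩, hmem⟩
    exact ⟨_, hmem, (mem_bSum_calc B _).2 ⟨i, j, hi0, hij, hjm, rfl⟩⟩
  · rintro ⟨x, hxa, hxb⟩
    obtain ⟨i, j, hi0, hij, hjm, rfl⟩ := (mem_bSum_calc B x).1 hxb
    exact ⟨i, ⟨hi0, by omega⟩, j, ⟨hij, hjm⟩, hxa⟩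

-- ===== VERDICT (by name: the statement is the Claim_ definition above) =====
theorem twoWayTwoSum_spec : Claim_equal_twoWayTwoSum := by
  intro A B _
  unfold Spec_twoWayTwoSum
  rw [Bool.eq_iff_iff, twoWayTwoSum_iff, twoWayTwoSum_alt_iff]
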